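-- pv_equiv track=rewrite | github.com/m-levytskyi/inverse-eval | analyze_maria_dataset.py | get_fronting_backing_info
-- ===== SOURCE A (Python) =====
-- def get_fronting_backing_info(layers):
--     """Extract fronting and backing material information"""
--     fronting = None
--     backing = None
--
--     for layer in layers:
--         if layer['name'] == 'fronting':
--             fronting = layer
--         elif layer['name'] == 'backing':
--             backing = layer
--
--     return fronting, backing
-- ===== SOURCE B (Python) =====
-- def get_fronting_backing_info(layers):
--     """Extract fronting and backing material information"""
--     def last(name):
--         return next((layer for layer in reversed(layers) if layer['name'] == name), None)
--     return last('fronting'), last('backing')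
-- ===== Notes on version B (the rewrite author's own statement) =====
-- stated objective: alternative
-- what changed: Replaces the forward loop tracking two mutable scalars with two back-to-front first-match searches (next over reversed(layers)), which yield the same last-occurrence results.
import Mathlib
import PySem

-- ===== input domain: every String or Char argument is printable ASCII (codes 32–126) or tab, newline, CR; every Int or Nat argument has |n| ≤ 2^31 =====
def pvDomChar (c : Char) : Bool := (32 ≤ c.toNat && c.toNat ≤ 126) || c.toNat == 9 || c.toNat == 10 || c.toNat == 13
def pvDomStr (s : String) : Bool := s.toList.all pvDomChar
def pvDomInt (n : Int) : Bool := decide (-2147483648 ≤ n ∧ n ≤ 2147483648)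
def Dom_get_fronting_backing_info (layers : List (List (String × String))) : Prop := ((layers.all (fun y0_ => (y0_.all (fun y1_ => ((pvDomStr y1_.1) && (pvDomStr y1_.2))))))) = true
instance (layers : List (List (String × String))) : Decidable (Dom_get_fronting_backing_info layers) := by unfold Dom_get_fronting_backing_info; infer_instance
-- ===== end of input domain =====

-- B replaces A's forward loop with two mutable slots by two back-to-front first-match
-- searches over reversed(layers); same last-occurrence semantics (objective: alternative).

-- layer['name']: first-match lookup in the association list (Python dicts have unique keys)
def pvName (layer : List (String × String)) : Option String :=
  (layer.find? (fun p => p.1 == "name")).map (·.2)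

-- ===== PORT A =====
-- forward loop over layers, updating the (fronting, backing) state;
-- under Pre_ every layer has a "name" key, so pvName is `some` and the
-- comparisons match Python's layer['name'] == '…' exactly.
def get_fronting_backing_info (layers : List (List (String × String))) : (Option (List (String × String))) × (Option (List (String × String))) :=
  layers.foldl
    (fun (st : Option (List (String × String)) × Option (List (String × String))) layer =>
      if pvName layer == some "fronting" then (some layer, st.2)
      else if pvName layer == some "backing" then (st.1, some layer)
      else st)
    (none, none)

-- ===== PORT B =====
-- two first-match searches over the reversed list
def get_fronting_backing_info_alt (layers : List (List (String × String))) : (Option (List (String × String))) × (Option (List (String × String))) :=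
  (layers.reverse.find? (fun layer => pvName layer == some "fronting"),
   layers.reverse.find? (fun layer => pvName layer == some "backing"))

-- ===== PRECONDITION & SPEC =====
-- Pre_ excludes exactly the inputs where Python A raises KeyError: a layer without a "name" key.
def Pre_get_fronting_backing_info (layers : List (List (String × String))) : Prop :=
  ∀ layer ∈ layers, (pvName layer).isSome = true
instance (layers : List (List (String × String))) : Decidable (Pre_get_fronting_backing_info layers) := by unfold Pre_get_fronting_backing_info; infer_instance

def pvWitness_get_fronting_backing_info : (List (List (String × String))) :=
  [[("name", "fronting"), ("t", "1")], [("name", "backing")], [("name", "x")]]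

def Spec_get_fronting_backing_info (layers : List (List (String × String))) (out : (Option (List (String × String))) × (Option (List (String × String)))) : Prop := out = get_fronting_backing_info_alt layers
instance (layers : List (List (String × String))) (out : (Option (List (String × String))) × (Option (List (String × String)))) : Decidable (Spec_get_fronting_backing_info layers out) := by unfold Spec_get_fronting_backing_info; infer_instance

-- ===== CLAIM (what is proved, stated in full; the proofs are below) =====
def Claim_equal_get_fronting_backing_info : Prop := ∀ (layers : List (List (String × String))), Dom_get_fronting_backing_info layers → Pre_get_fronting_backing_info layers → Spec_get_fronting_backing_info layers (get_fronting_backing_info layers)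

-- ===== LEMMAS AND PROOFS =====

-- loop invariant: the fold started at any state equals the reversed first-match,
-- falling back to the start state when no match exists
theorem pv_fold_eq (layers : List (List (String × String)))
    (f0 b0 : Option (List (String × String))) :
    layers.foldl
      (fun (st : Option (List (String × String)) × Option (List (String × String))) layer =>
        if pvName layer == some "fronting" then (some layer, st.2)
        else if pvName layer == some "backing" then (st.1, some layer)
        else st)
      (f0, b0)
    = ((layers.reverse.find? (fun layer => pvName layer == some "fronting")).or f0,
       (layers.reverse.find? (fun layer => pvName layer == some "backing")).or b0) := by
  induction layers generalizing f0 b0 with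
  | nil => simp
  | cons x xs ih =>
    by_cases hf : (pvName x == some "fronting") = true
    · have hb : (pvName x == some "backing") = false := by
        cases h : pvName x with
        | none => simp [h] at hf
        | some s =>
          simp only [h, beq_iff_eq, Option.some.injEq] at hf ⊢
          simp [hf]
      rw [List.foldl_cons, if_pos hf, ih]
      simp [List.find?_append, hf, hb]
    · by_cases hb : (pvName x == some "backing") = true
      · rw [List.foldl_cons, if_neg hf, if_pos hb, ih]
        simp [List.find?_append, hf, hb]
      · rw [List.foldl_cons, if_neg hf, if_neg hb, ih]
        simp [List.find?_append, hf, hb]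

-- ===== VERDICT (by name: the statement is the Claim_ definition above) =====
theorem get_fronting_backing_info_spec : Claim_equal_get_fronting_backing_info := by
  intro layers _ _
  show get_fronting_backing_info layers = get_fronting_backing_info_alt layers
  unfold get_fronting_backing_info get_fronting_backing_info_alt
  rw [pv_fold_eq]
  simp
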